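-- pv_equiv track=rewrite | github.com/Ravikumarchavva/Data-Structures-and-Algorithmns | archives/archive1/01_arrays_and_hashing/append_n_chars_to_make_substring.py | min_chars_to_append
-- ===== SOURCE A (Python) =====
-- def min_chars_to_append(s: str, t: str) -> int:
--         l1 = len(s)
--         l2 = len(t)
--         p1 = 0
--         p2 = 0
--
--         while p1 < l1 and p2 < l2:
--             if s[p1] == t[p2]:
--                 p1 += 1
--                 p2 += 1
--             else:
--                 p1 += 1
--
--         return l2 - p2
-- ===== SOURCE B (Python) =====
-- def min_chars_to_append(s: str, t: str) -> int:
--     # Build an index: char -> ascending list of its positions in s.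
--     positions = {}
--     for i, c in enumerate(s):
--         positions.setdefault(c, []).append(i)
--
--     matched = 0
--     cur = 0  # positions of s strictly below cur are already consumed
--     for ch in t:
--         lst = positions.get(ch, [])
--         # lower bound: first index in lst whose value is >= cur (binary search)
--         lo, hi = 0, len(lst)
--         while lo < hi:
--             mid = (lo + hi) // 2
--             if lst[mid] < cur:
--                 lo = mid + 1
--             else:
--                 hi = mid
--         if lo == len(lst):
--             break
--         cur = lst[lo] + 1
--         matched += 1
--     return len(t) - matched
-- ===== Notes on version B (the rewrite author's own statement) =====
-- stated objective: alternative
-- what changed: Replaced the two-pointer scan over s with a precomputed hash index (char -> sorted position list built in one pass) queried by a hand-written binary search for the first position >= the cursor, looping over t.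
import Mathlib
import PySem

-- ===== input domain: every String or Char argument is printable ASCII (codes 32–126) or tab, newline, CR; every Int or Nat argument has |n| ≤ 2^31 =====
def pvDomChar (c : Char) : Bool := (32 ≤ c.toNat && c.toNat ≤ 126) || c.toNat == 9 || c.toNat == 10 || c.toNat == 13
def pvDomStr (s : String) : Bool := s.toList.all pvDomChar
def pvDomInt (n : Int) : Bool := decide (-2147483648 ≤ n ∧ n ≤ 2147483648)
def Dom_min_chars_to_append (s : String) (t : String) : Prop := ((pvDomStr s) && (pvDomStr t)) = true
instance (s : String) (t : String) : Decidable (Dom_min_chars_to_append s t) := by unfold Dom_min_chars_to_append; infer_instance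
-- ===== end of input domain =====

-- B replaces A's two-pointer scan by a precomputed char->positions index queried
-- with a hand-written binary search (alternative algorithm; similar cost).


-- ===== PORT A =====
-- the while loop: advance p1 always, p2 only on a match; return count of t left
def pvGoA : List Char → List Char → Nat
  | _, [] => 0
  | [], d :: t => (d :: t).length
  | c :: s, d :: t => if c = d then pvGoA s t else pvGoA s (d :: t)

def min_chars_to_append (s : String) (t : String) : Int :=
  (pvGoA s.toList t.toList : Int)

-- ===== PORT B =====
-- 'for i, c in enumerate(s): positions.setdefault(c, []).append(i)'
-- (setdefault-then-append = modify with default [])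
def pvIndex : List Char → Nat → PySem.Dict Char (List Int) → PySem.Dict Char (List Int)
  | [], _, d => d
  | c :: l, i, d => pvIndex l (i + 1) (d.modify c [] (· ++ [(i : Int)]))

-- the 'while lo < hi' binary-search loop; lst[mid] is always in range in B,
-- ported as getD (exact on in-range indices)
def pvLB (lst : List Int) (x : Int) (lo hi : Nat) : Nat :=
  if h : lo < hi then
    let mid := (lo + hi) / 2
    if lst.getD mid 0 < x then pvLB lst x (mid + 1) hi else pvLB lst x lo mid
  else lo
termination_by hi - lo
decreasing_by all_goals omega

-- 'for ch in t' with break; returns matched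
def pvLoop (d : PySem.Dict Char (List Int)) : List Char → Int → Nat → Nat
  | [], _, m => m
  | ch :: t, cur, m =>
    let lst := d.getD ch []
    let j := pvLB lst cur 0 lst.length
    if j = lst.length then m else pvLoop d t (lst.getD j 0 + 1) (m + 1)

def min_chars_to_append_alt (s : String) (t : String) : Int :=
  let d := pvIndex s.toList 0 PySem.Dict.empty
  (t.toList.length : Int) - (pvLoop d t.toList 0 0 : Int)

-- ===== PRECONDITION & SPEC =====
def Spec_min_chars_to_append (s : String) (t : String) (out : Int) : Prop := out = min_chars_to_append_alt s t
instance (s : String) (t : String) (out : Int) : Decidable (Spec_min_chars_to_append s t out) := by unfold Spec_min_chars_to_append; infer_instance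

-- ===== CLAIM (what is proved, stated in full; the proofs are below) =====
def Claim_equal_min_chars_to_append : Prop := ∀ (s : String) (t : String), Dom_min_chars_to_append s t → Spec_min_chars_to_append s t (min_chars_to_append s t)

-- ===== LEMMAS AND PROOFS =====

-- proof-side: the ascending list of indices (from offset i) where l carries ch
def pvIdxs : List Char → Char → Nat → List Int
  | [], _, _ => []
  | c :: l, ch, i => (if c = ch then [(i : Int)] else []) ++ pvIdxs l ch (i + 1)

-- proof-side: first index ≥ cur with l[idx] = ch
def pvFind (l : List Char) (ch : Char) (cur : Nat) : Option Nat :=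
  if h : cur < l.length then
    (if l.getD cur 'A' = ch then some cur else pvFind l ch (cur + 1))
  else none
termination_by l.length - cur
decreasing_by omega

-- proof-side: A-style greedy with explicit cursor
def pvGoC (l : List Char) : List Char → Nat → Nat
  | [], _ => 0
  | ch :: t, cur =>
    match pvFind l ch cur with
    | some k => 1 + pvGoC l t (k + 1)
    | none => 0

theorem pvIndex_getD (l : List Char) (i : Nat) (d : PySem.Dict Char (List Int)) (c : Char) :
    (pvIndex l i d).getD c [] = d.getD c [] ++ pvIdxs l c i := by
  induction l generalizing i d with
  | nil => simp [pvIndex, pvIdxs]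
  | cons x l ih =>
    simp only [pvIndex, pvIdxs, ih, PySem.Dict.getD_modify]
    by_cases h : c = x
    · subst h; simp
    · simp [h, Ne.symm h]

theorem pvIdxs_mem (l : List Char) (ch : Char) (i : Nat) (x : Int) :
    x ∈ pvIdxs l ch i ↔ ∃ k, k < l.length ∧ l.getD k 'A' = ch ∧ x = ((i + k : Nat) : Int) := by
  induction l generalizing i with
  | nil => simp [pvIdxs]
  | cons c l ih =>
    constructor
    · intro h
      have hsplit : (c = ch ∧ x = (i : Int)) ∨ x ∈ pvIdxs l ch (i + 1) := by
        simpa [pvIdxs] using h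
      rcases hsplit with ⟨hcc, hx⟩ | hmem
      · exact ⟨0, by simp, by simpa using hcc, by simp [hx]⟩
      · obtain ⟨k, hk, hck, hx⟩ := (ih (i + 1)).1 hmem
        refine ⟨k + 1, by simpa using hk, by simpa using hck, ?_⟩
        rw [hx]; push_cast; ring
    · rintro ⟨k, hk, hck, hx⟩
      cases k with
      | zero =>
        have hc : c = ch := by simpa using hck
        simp [pvIdxs, hc, hx]
      | succ k =>
        have hck' : l.getD k 'A' = ch := by simpa using hck
        have : x ∈ pvIdxs l ch (i + 1) :=
          (ih (i + 1)).2 ⟨k, by simp only [List.length_cons] at hk; omega, hck', by rw [hx]; push_cast; ring⟩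
        simp [pvIdxs, this]

theorem pvIdxs_sorted (l : List Char) (ch : Char) (i : Nat) :
    (pvIdxs l ch i).Pairwise (· < ·) := by
  induction l generalizing i with
  | nil => simp [pvIdxs]
  | cons c l ih =>
    simp only [pvIdxs]
    by_cases h : c = ch
    · simp only [h]
      refine List.Pairwise.cons ?_ (ih (i + 1))
      intro x hx
      obtain ⟨k, _, _, hx⟩ := (pvIdxs_mem l ch (i + 1) x).1 hx
      rw [hx]; push_cast; omega
    · simpa [h] using ih (i + 1)

theorem pvFind_none (l : List Char) (ch : Char) (cur : Nat) :
    pvFind l ch cur = none ↔ ∀ k, cur ≤ k → k < l.length → l.getD k 'A' ≠ ch := by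
  rw [pvFind]
  by_cases h : cur < l.length
  · rw [dif_pos h]
    by_cases hc : l.getD cur 'A' = ch
    · rw [if_pos hc]
      simp only [reduceCtorEq, false_iff, not_forall]
      exact ⟨cur, le_rfl, h, not_not_intro hc⟩
    · rw [if_neg hc, pvFind_none]
      constructor
      · intro hall k hk1 hk2
        rcases Nat.eq_or_lt_of_le hk1 with rfl | hlt
        · exact hc
        · exact hall k hlt hk2
      · intro hall k hk1 hk2; exact hall k (Nat.le_of_succ_le hk1) hk2
  · rw [dif_neg h]
    simp only [true_iff]
    intro k _ hk2; omega
termination_by l.length - cur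
decreasing_by omega

theorem pvFind_some (l : List Char) (ch : Char) (cur k : Nat)
    (h : pvFind l ch cur = some k) :
    cur ≤ k ∧ k < l.length ∧ l.getD k 'A' = ch ∧
      ∀ k', cur ≤ k' → k' < l.length → l.getD k' 'A' = ch → k ≤ k' := by
  rw [pvFind] at h
  by_cases hlt : cur < l.length
  · rw [dif_pos hlt] at h
    by_cases hc : l.getD cur 'A' = ch
    · rw [if_pos hc] at h
      cases h
      exact ⟨le_rfl, hlt, hc, fun k' h1 _ _ => h1⟩
    · rw [if_neg hc] at h
      obtain ⟨h1, h2, h3, h4⟩ := pvFind_some l ch (cur + 1) k h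
      refine ⟨by omega, h2, h3, ?_⟩
      intro k' hk1 hk2 hk3
      rcases Nat.eq_or_lt_of_le hk1 with rfl | hlt'
      · exact absurd hk3 hc
      · exact h4 k' hlt' hk2 hk3
  · rw [dif_neg hlt] at h
    cases h
termination_by l.length - cur
decreasing_by omega

-- binary-search lower bound spec on a sorted list
theorem pvLB_spec (lst : List Int) (x : Int) (lo hi : Nat)
    (hs : ∀ p q, p ≤ q → q < lst.length → lst.getD p 0 ≤ lst.getD q 0)
    (hhi : hi ≤ lst.length) (hlohi : lo ≤ hi)
    (h1 : ∀ i, i < lo → lst.getD i 0 < x)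
    (h2 : ∀ i, hi ≤ i → i < lst.length → x ≤ lst.getD i 0) :
    pvLB lst x lo hi ≤ lst.length ∧ (∀ i, i < pvLB lst x lo hi → lst.getD i 0 < x) ∧
      (∀ i, pvLB lst x lo hi ≤ i → i < lst.length → x ≤ lst.getD i 0) := by
  rw [pvLB]
  dsimp only
  by_cases h : lo < hi
  · rw [dif_pos h]
    by_cases hmid : lst.getD ((lo + hi) / 2) 0 < x
    · rw [if_pos hmid]
      exact pvLB_spec lst x ((lo + hi) / 2 + 1) hi hs hhi (by omega)
        (fun i hi' => lt_of_le_of_lt (hs i ((lo + hi) / 2) (by omega) (by omega)) hmid) h2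
    · rw [if_neg hmid]
      refine pvLB_spec lst x lo ((lo + hi) / 2) hs (by omega) (by omega) h1 ?_
      intro i hi1 hi2
      have := hs ((lo + hi) / 2) i hi1 hi2
      omega
  · rw [dif_neg h]
    exact ⟨by omega, fun i hi' => h1 i (by omega), fun i hi1 hi2 => h2 i (by omega) hi2⟩
termination_by hi - lo
decreasing_by all_goals omega

-- A's two-pointer loop equals the cursor greedy
theorem pvGoA_eq_pvGoC (l : List Char) :
    ∀ n t cur, (l.length - cur) + List.length t ≤ n →
      pvGoA (l.drop cur) t + pvGoC l t cur = t.length := by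
  intro n
  induction n with
  | zero =>
    intro t cur h
    have ht : t = [] := by cases t <;> simp_all
    subst ht; simp [pvGoA, pvGoC]
  | succ n ih =>
    intro t cur h
    cases t with
    | nil => simp [pvGoA, pvGoC]
    | cons d t =>
      by_cases hcur : cur < l.length
      · have hdrop : l.drop cur = l.getD cur 'A' :: l.drop (cur + 1) := by
          rw [List.getD_eq_getElem l 'A' hcur, ← List.drop_eq_getElem_cons]
        by_cases hc : l.getD cur 'A' = d
        · have hfind : pvFind l d cur = some cur := by rw [pvFind, dif_pos hcur, if_pos hc]
          rw [hdrop]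
          simp only [pvGoA, if_pos hc, pvGoC, hfind]
          have := ih t (cur + 1) (by simp at h ⊢; omega)
          simp at this ⊢; omega
        · have hfind : pvFind l d cur = pvFind l d (cur + 1) := by
            rw [pvFind, dif_pos hcur, if_neg hc]
          rw [hdrop]
          simp only [pvGoA, if_neg hc, pvGoC, hfind]
          have := ih (d :: t) (cur + 1) (by simp at h ⊢; omega)
          simp only [pvGoC] at this
          simpa using this
      · have hdrop : l.drop cur = [] := List.drop_eq_nil_of_le (by omega)
        have hfind : pvFind l d cur = none := by rw [pvFind, dif_neg hcur]
        rw [hdrop]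
        simp [pvGoA, pvGoC, hfind]

-- B's loop equals the cursor greedy
theorem pvLoop_eq_pvGoC (l : List Char) (t : List Char) (c m : Nat) :
    pvLoop (pvIndex l 0 PySem.Dict.empty) t ((c : Nat) : Int) m = m + pvGoC l t c := by
  induction t generalizing c m with
  | nil => simp [pvLoop, pvGoC]
  | cons ch t ih =>
    have hgd : (pvIndex l 0 PySem.Dict.empty).getD ch [] = pvIdxs l ch 0 := by
      rw [pvIndex_getD]; simp [PySem.Dict.getD_empty]
    set lst := pvIdxs l ch 0 with hlst
    have hs : ∀ p q, p ≤ q → q < lst.length → lst.getD p 0 ≤ lst.getD q 0 := by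
      intro p q hpq hq
      rcases Nat.eq_or_lt_of_le hpq with rfl | hlt
      · exact le_rfl
      · have hsort : lst.Pairwise (· < ·) := by rw [hlst]; exact pvIdxs_sorted l ch 0
        have := (List.pairwise_iff_getElem).1 hsort p q (by omega) hq hlt
        rw [List.getD_eq_getElem _ 0 (by omega), List.getD_eq_getElem _ 0 hq]
        exact le_of_lt this
    obtain ⟨hr1, hr2, hr3⟩ := pvLB_spec lst ((c : Nat) : Int) 0 lst.length hs le_rfl
      (Nat.zero_le _) (fun i hi => absurd hi (Nat.not_lt_zero i))
      (fun i hi1 hi2 => absurd hi2 (by omega))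
    have hstep : pvLoop (pvIndex l 0 PySem.Dict.empty) (ch :: t) ((c : Nat) : Int) m =
        (if pvLB lst ((c : Nat) : Int) 0 lst.length = lst.length then m
         else pvLoop (pvIndex l 0 PySem.Dict.empty) t
           (lst.getD (pvLB lst ((c : Nat) : Int) 0 lst.length) 0 + 1) (m + 1)) := by
      simp only [pvLoop, hgd]
    set j := pvLB lst ((c : Nat) : Int) 0 lst.length with hj
    cases hF : pvFind l ch c with
    | none =>
      have hall : ∀ x ∈ lst, x < ((c : Nat) : Int) := by
        intro x hx
        obtain ⟨k, hk, hck, hx⟩ := (pvIdxs_mem l ch 0 x).1 hx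
        by_cases hck2 : c ≤ k
        · exact absurd hck ((pvFind_none l ch c).1 hF k hck2 hk)
        · rw [hx]; push_cast; omega
      have hjlen : j = lst.length := by
        by_contra hne
        have hjlt : j < lst.length := lt_of_le_of_ne hr1 hne
        have hx : lst.getD j 0 ∈ lst := by
          rw [List.getD_eq_getElem _ 0 hjlt]; exact List.getElem_mem _
        exact absurd (hr3 j le_rfl hjlt) (not_le.2 (hall _ hx))
      rw [hstep, if_pos hjlen]
      simp [pvGoC, hF]
    | some k =>
      obtain ⟨hk1, hk2, hk3, hk4⟩ := pvFind_some l ch c k hF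
      have hkmem : ((k : Nat) : Int) ∈ lst := (pvIdxs_mem l ch 0 _).2 ⟨k, hk2, hk3, by simp⟩
      obtain ⟨p, hp, hpe⟩ := List.mem_iff_getElem.1 hkmem
      have hpD : lst.getD p 0 = (k : Int) := by rw [List.getD_eq_getElem _ _ hp, hpe]
      have hjp : j ≤ p := by
        by_contra hgt
        have h' := hr2 p (by omega)
        rw [hpD] at h'
        have : (c : Int) ≤ (k : Int) := by exact_mod_cast Nat.cast_le.2 hk1
        omega
      have hjlt : j < lst.length := lt_of_le_of_lt hjp hp
      have hge : ((c : Nat) : Int) ≤ lst.getD j 0 := hr3 j le_rfl hjlt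
      have hmem : lst.getD j 0 ∈ lst := by
        rw [List.getD_eq_getElem _ 0 hjlt]; exact List.getElem_mem _
      obtain ⟨k', hk'2, hk'3, hk'x⟩ := (pvIdxs_mem l ch 0 _).1 hmem
      have hck' : c ≤ k' := by rw [hk'x] at hge; push_cast at hge; omega
      have hle1 : (k : Int) ≤ lst.getD j 0 := by
        have := hk4 k' hck' hk'2 hk'3
        rw [hk'x]; push_cast; omega
      have hle2 : lst.getD j 0 ≤ (k : Int) := by rw [← hpD]; exact hs j p hjp hp
      have hDj : lst.getD j 0 = (k : Int) := le_antisymm hle2 hle1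
      rw [hstep, if_neg (by omega), hDj]
      have hcast : (k : Int) + 1 = (((k + 1 : Nat)) : Int) := by push_cast; ring
      rw [hcast, ih (k + 1) (m + 1)]
      simp only [pvGoC, hF]
      omega

-- ===== VERDICT (by name: the statement is the Claim_ definition above) =====
theorem min_chars_to_append_spec : Claim_equal_min_chars_to_append := by
  intro s t _
  unfold Spec_min_chars_to_append min_chars_to_append
  rw [show min_chars_to_append_alt s t =
    (t.toList.length : Int) - (pvLoop (pvIndex s.toList 0 PySem.Dict.empty) t.toList 0 0 : Int) from rfl]
  have h1 := pvGoA_eq_pvGoC s.toList ((s.toList.length - 0) + t.toList.length) t.toList 0 le_rfl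
  have h2 := pvLoop_eq_pvGoC s.toList t.toList 0 0
  simp only [List.drop_zero] at h1
  simp only [Nat.cast_zero] at h2
  rw [h2]
  omega
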